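-- pv_equiv track=rewrite | github.com/RP2025/code-and-chaos | ProjectsMiniPlayer/tictactoe/tic_tac_toe.py | winningpatterns
-- ===== SOURCE A (Python) =====
-- def winningpatterns(grid):
--     positions = [[i * grid + j for j in range(grid)] for i in range(grid)]
--     return (
--         positions +                                            # rows
--         [[positions[j][i] for j in range(grid)] for i in range(grid)] +  # columns
--         [[positions[i][i] for i in range(grid)],             # diagonal top-left → bottom-right
--          [positions[grid-i-1][i] for i in range(grid)]]     # diagonal top-right → bottom-left
--     )
-- ===== SOURCE B (Python) =====
-- def winningpatterns(grid):
--     # Every winning line is an arithmetic progression of cell indices: describe each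
--     # line by a (start, step) pair and expand the descriptors with range().
--     lines = [(i * grid, 1) for i in range(grid)]            # rows
--     lines += [(j, grid) for j in range(grid)]               # columns
--     lines += [(0, grid + 1),                                # main diagonal
--               ((grid - 1) * grid, -(grid - 1))]             # anti-diagonal (bottom-left up)
--     return [list(range(s, s + grid * d, d)) if d else [s] * grid
--             for (s, d) in lines]
-- ===== Notes on version B (the rewrite author's own statement) =====
-- stated objective: faster
-- what changed: B represents each winning line as an arithmetic progression described by a (start, step) pair, builds the list of 2n+2 descriptors, and expands each with a single C-level range() call, instead of materializing an n x n positions table and reading rows, a transpose and two diagonals out of it element by element.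
import Mathlib
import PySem

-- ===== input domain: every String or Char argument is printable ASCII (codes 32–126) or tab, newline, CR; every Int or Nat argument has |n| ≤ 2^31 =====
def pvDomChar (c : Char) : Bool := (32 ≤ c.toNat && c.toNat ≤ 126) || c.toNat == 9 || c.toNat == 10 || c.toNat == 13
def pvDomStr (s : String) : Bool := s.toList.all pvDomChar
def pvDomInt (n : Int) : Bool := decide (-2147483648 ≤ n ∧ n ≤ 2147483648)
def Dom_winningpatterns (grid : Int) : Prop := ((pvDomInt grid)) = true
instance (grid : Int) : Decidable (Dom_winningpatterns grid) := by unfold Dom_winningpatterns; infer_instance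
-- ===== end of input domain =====

-- B describes each winning line as an arithmetic progression (start, step) and expands the
-- 2n+2 descriptors with range(), instead of materializing an n x n positions table and indexing it.


-- ===== PORT A =====
-- positions[j][i] is always in range (0 ≤ i,j < grid), so pyGetD is exact here.
def winningpatterns (grid : Int) : List (List Int) :=
  let positions : List (List Int) :=
    (PySem.List.pyRange 0 grid 1).map (fun i =>
      (PySem.List.pyRange 0 grid 1).map (fun j => i * grid + j))
  positions ++
  (PySem.List.pyRange 0 grid 1).map (fun i =>
    (PySem.List.pyRange 0 grid 1).map (fun j =>
      PySem.List.pyGetD (PySem.List.pyGetD positions j []) i 0)) ++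
  [(PySem.List.pyRange 0 grid 1).map (fun i =>
      PySem.List.pyGetD (PySem.List.pyGetD positions i []) i 0),
   (PySem.List.pyRange 0 grid 1).map (fun i =>
      PySem.List.pyGetD (PySem.List.pyGetD positions (grid - i - 1) []) i 0)]

-- ===== PORT B =====
-- 'list(range(s, s + grid*d, d)) if d else [s]*grid' → pyRange / pyRepeat (exact)
def winningpatterns_alt (grid : Int) : List (List Int) :=
  let lines : List (Int × Int) :=
    (PySem.List.pyRange 0 grid 1).map (fun i => (i * grid, 1)) ++
    (PySem.List.pyRange 0 grid 1).map (fun j => (j, grid)) ++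
    [((0 : Int), grid + 1), ((grid - 1) * grid, -(grid - 1))]
  lines.map (fun p =>
    if p.2 ≠ 0 then PySem.List.pyRange p.1 (p.1 + grid * p.2) p.2
    else PySem.List.pyRepeat [p.1] grid)

-- ===== PRECONDITION & SPEC =====
def Spec_winningpatterns (grid : Int) (out : List (List Int)) : Prop := out = winningpatterns_alt grid
instance (grid : Int) (out : List (List Int)) : Decidable (Spec_winningpatterns grid out) := by unfold Spec_winningpatterns; infer_instance

-- ===== CLAIM (what is proved, stated in full; the proofs are below) =====
def Claim_equal_winningpatterns : Prop := ∀ (grid : Int), Dom_winningpatterns grid → Spec_winningpatterns grid (winningpatterns grid)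

-- ===== LEMMAS AND PROOFS =====

-- range(s, s + n*d, d) enumerates the arithmetic progression s, s+d, …, s+(n-1)d
lemma pyRange_arith (s d n : Int) (hd : d ≠ 0) :
    PySem.List.pyRange s (s + n * d) d = (List.range n.toNat).map (fun k : Nat => s + d * (k : Int)) := by
  unfold PySem.List.pyRange
  rw [if_neg hd]
  simp only
  congr 2
  by_cases hdp : 0 < d
  · rw [if_pos hdp]
    by_cases hn : 0 < n
    · have h1 : s < s + n * d := by nlinarith
      rw [if_pos h1]
      have h2 : s + n * d - s + d - 1 = (d - 1) + n * d := by ring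
      rw [h2, Int.add_mul_ediv_right _ _ hd,
          Int.ediv_eq_zero_of_lt (by omega) (by omega)]
      omega
    · have h1 : ¬ s < s + n * d := by nlinarith
      rw [if_neg h1]; omega
  · have hdn : d < 0 := by omega
    rw [if_neg hdp]
    by_cases hn : 0 < n
    · have h1 : s + n * d < s := by nlinarith
      rw [if_pos h1]
      have h2 : s - (s + n * d) + -d - 1 = (-d - 1) + n * (-d) := by ring
      rw [h2, Int.add_mul_ediv_right _ _ (by omega : (-d : Int) ≠ 0),
          Int.ediv_eq_zero_of_lt (by omega) (by omega)]
      omega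
    · have h1 : ¬ s + n * d < s := by nlinarith
      rw [if_neg h1]; omega

-- A's value as closed-form comprehensions (the nested pyGetD reads resolved)
lemma a_closed (n : Int) :
    winningpatterns n
      = (PySem.List.pyRange 0 n 1).map (fun i => (PySem.List.pyRange 0 n 1).map (fun j => i * n + j)) ++
        (PySem.List.pyRange 0 n 1).map (fun i => (PySem.List.pyRange 0 n 1).map (fun j => j * n + i)) ++
        [(PySem.List.pyRange 0 n 1).map (fun i => i * n + i),
         (PySem.List.pyRange 0 n 1).map (fun i => (n - i - 1) * n + i)] := by
  unfold winningpatterns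
  simp only
  congr 1
  · congr 1
    apply List.map_congr_left
    intro i hi
    have hi' := (PySem.List.mem_pyRange_one).1 hi
    apply List.map_congr_left
    intro j hj
    have hj' := (PySem.List.mem_pyRange_one).1 hj
    rw [PySem.List.pyGetD_map_pyRange_of_nonneg _ n j [] hj'.1 hj'.2,
        PySem.List.pyGetD_map_pyRange_of_nonneg _ n i 0 hi'.1 hi'.2]
  · congr 1
    · apply List.map_congr_left
      intro i hi
      have hi' := (PySem.List.mem_pyRange_one).1 hi
      rw [PySem.List.pyGetD_map_pyRange_of_nonneg _ n i [] hi'.1 hi'.2,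
          PySem.List.pyGetD_map_pyRange_of_nonneg _ n i 0 hi'.1 hi'.2]
    · congr 1
      apply List.map_congr_left
      intro i hi
      have hi' := (PySem.List.mem_pyRange_one).1 hi
      rw [PySem.List.pyGetD_map_pyRange_of_nonneg _ n (n - i - 1) [] (by omega) (by omega),
          PySem.List.pyGetD_map_pyRange_of_nonneg _ n i 0 hi'.1 hi'.2]

-- B's value: expanding each descriptor gives the same comprehensions
lemma b_closed (n : Int) :
    winningpatterns_alt n
      = (PySem.List.pyRange 0 n 1).map (fun i => (PySem.List.pyRange 0 n 1).map (fun j => i * n + j)) ++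
        (PySem.List.pyRange 0 n 1).map (fun i => (PySem.List.pyRange 0 n 1).map (fun j => j * n + i)) ++
        [(PySem.List.pyRange 0 n 1).map (fun i => i * n + i),
         (PySem.List.pyRange 0 n 1).map (fun i => (n - i - 1) * n + i)] := by
  unfold winningpatterns_alt
  simp only [List.map_append, List.map_map, List.map_cons, List.map_nil]
  congr 1
  · congr 1
    · -- rows: descriptor (i*n, 1)
      apply List.map_congr_left
      intro i _
      simp only [Function.comp]
      rw [if_pos (by norm_num : (1 : Int) ≠ 0), pyRange_arith _ 1 n one_ne_zero,
          PySem.List.pyRange_one, List.map_map]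
      simp only [sub_zero]
      apply List.map_congr_left
      intro k _
      simp only [Function.comp]
      ring
    · -- columns: descriptor (j, n); j ∈ range(n) forces 0 < n so n ≠ 0
      apply List.map_congr_left
      intro j hj
      have hj' := (PySem.List.mem_pyRange_one).1 hj
      simp only [Function.comp]
      rw [if_pos (by omega : (n : Int) ≠ 0), pyRange_arith _ n n (by omega),
          PySem.List.pyRange_one, List.map_map]
      simp only [sub_zero]
      apply List.map_congr_left
      intro k _
      simp only [Function.comp]
      ring
  · -- the two diagonals
    congr 1
    · -- main diagonal: descriptor (0, n+1)
      by_cases hm : n = -1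
      · subst hm
        simp [PySem.List.pyRepeat_singleton, PySem.List.pyRange_one_eq_nil (by norm_num : (-1 : Int) ≤ 0)]
      · rw [if_pos (by simpa using (by omega : (n + 1 : Int) ≠ 0)),
            pyRange_arith _ (n + 1) n (by omega), PySem.List.pyRange_one, List.map_map]
        simp only [sub_zero]
        apply List.map_congr_left
        intro k _
        simp only [Function.comp]
        ring
    · -- anti-diagonal: descriptor ((n-1)*n, -(n-1))
      congr 1
      by_cases hm : n = 1
      · subst hm
        norm_num [PySem.List.pyRepeat_singleton, PySem.List.pyRange_one_singleton]
      · rw [if_pos (by simpa using (by omega : (-(n - 1) : Int) ≠ 0)),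
            pyRange_arith _ (-(n - 1)) n (by omega), PySem.List.pyRange_one, List.map_map]
        simp only [sub_zero]
        apply List.map_congr_left
        intro k _
        simp only [Function.comp]
        ring

-- ===== VERDICT (by name: the statement is the Claim_ definition above) =====
theorem winningpatterns_spec : Claim_equal_winningpatterns := by
  intro n _
  show winningpatterns n = winningpatterns_alt n
  rw [a_closed, b_closed]
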